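-- pv_equiv track=rewrite | github.com/anurag-saran-m/Python | String_method_custom_module (1).py | lower_custom
-- ===== SOURCE A (Python) =====
-- def lower_custom(string):
--     if type(string)==str:
--         empty_lst=[]
--         for char in string:
--
--             if 65<=ord(char)<=90:
--                 char=chr(ord(char)+32)
--                 empty_lst.append(char)
--             else:
--                 empty_lst.append(char)
--         return ''.join(empty_lst)
--     else:
--         return 'please enter string'
-- ===== SOURCE B (Python) =====
-- _TABLE = {i: i + 32 for i in range(65, 91)}
--
-- def lower_custom(string):
--     if type(string) == str:
--         return string.translate(_TABLE)
--     else: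
--         return 'please enter string'
-- ===== Notes on version B (the rewrite author's own statement) =====
-- stated objective: faster
-- what changed: Replaces the explicit per-character branch-and-append loop building a list with a translation table dict {65..90 -> +32} built once and applied via str.translate in a single table-driven pass (C-level, constant-factor speedup).
import Mathlib
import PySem

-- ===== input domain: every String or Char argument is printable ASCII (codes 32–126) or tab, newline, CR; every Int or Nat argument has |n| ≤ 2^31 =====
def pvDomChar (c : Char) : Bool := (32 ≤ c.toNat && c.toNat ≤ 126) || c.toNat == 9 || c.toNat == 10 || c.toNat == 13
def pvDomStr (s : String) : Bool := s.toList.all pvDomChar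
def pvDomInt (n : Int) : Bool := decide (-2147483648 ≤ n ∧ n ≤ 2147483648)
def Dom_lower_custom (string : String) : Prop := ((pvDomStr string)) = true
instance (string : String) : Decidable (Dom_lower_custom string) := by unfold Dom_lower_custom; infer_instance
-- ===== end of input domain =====

-- B replaces A's char-by-char branch-and-append loop by a precomputed A→Z translation table
-- applied with str.translate (objective: idiomatic). In Lean the argument is a String, so the
-- Python `type(string)==str` guard is always true and both ports are the str branch.

-- ===== PORT A =====
-- for char in string: append lowered-or-unchanged char to empty_lst; return ''.join(empty_lst)
def lower_custom (string : String) : String :=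
  String.mk (string.toList.foldl
    (fun acc c =>
      if 65 ≤ c.toNat ∧ c.toNat ≤ 90 then acc ++ [Char.ofNat (c.toNat + 32)] else acc ++ [c])
    [])

-- ===== PORT B =====
-- _TABLE = {i: i + 32 for i in range(65, 91)}
def pvTable : PySem.Dict Int Int :=
  (PySem.List.pyRange 65 91 1).foldl (fun d i => d.insert i (i + 32)) PySem.Dict.empty

-- string.translate(_TABLE): each codepoint mapped through the table if present, else kept
def lower_custom_alt (string : String) : String :=
  String.mk (string.toList.map (fun c =>
    match pvTable.get? (c.toNat : Int) with
    | some v => Char.ofNat v.toNat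
    | none => c))

-- ===== PRECONDITION & SPEC =====
def Spec_lower_custom (string : String) (out : String) : Prop := out = lower_custom_alt string
instance (string : String) (out : String) : Decidable (Spec_lower_custom string out) := by unfold Spec_lower_custom; infer_instance

-- ===== CLAIM (what is proved, stated in full; the proofs are below) =====
def Claim_equal_lower_custom : Prop := ∀ (string : String), Dom_lower_custom string → Spec_lower_custom string (lower_custom string)

-- ===== LEMMAS AND PROOFS =====

lemma pvTable_eq : pvTable = PySem.Dict.mk
    [(65, 97), (66, 98), (67, 99), (68, 100), (69, 101), (70, 102), (71, 103), (72, 104),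
     (73, 105), (74, 106), (75, 107), (76, 108), (77, 109), (78, 110), (79, 111), (80, 112),
     (81, 113), (82, 114), (83, 115), (84, 116), (85, 117), (86, 118), (87, 119), (88, 120),
     (89, 121), (90, 122)] := by decide

lemma pvTable_get? (n : Int) :
    pvTable.get? n = if 65 ≤ n ∧ n ≤ 90 then some (n + 32) else none := by
  rw [pvTable_eq]
  by_cases h : 65 ≤ n ∧ n ≤ 90
  · rw [if_pos h]
    obtain ⟨h1, h2⟩ := h
    interval_cases n <;> decide
  · rw [if_neg h]
    rw [PySem.Dict.get?_eq_none_iff_not_mem_keys]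
    simp only [PySem.Dict.keys_mk, List.map_cons, List.map_nil, List.mem_cons, List.not_mem_nil, or_false]
    omega

lemma pvChar_step (c : Char) :
    (match pvTable.get? (c.toNat : Int) with
     | some v => Char.ofNat v.toNat
     | none => c) =
    if 65 ≤ c.toNat ∧ c.toNat ≤ 90 then Char.ofNat (c.toNat + 32) else c := by
  rw [pvTable_get?]
  by_cases h : 65 ≤ c.toNat ∧ c.toNat ≤ 90
  · have h' : 65 ≤ (c.toNat : Int) ∧ (c.toNat : Int) ≤ 90 :=
      ⟨by exact_mod_cast h.1, by exact_mod_cast h.2⟩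
    rw [if_pos h', if_pos h]
    show Char.ofNat ((c.toNat : Int) + 32).toNat = Char.ofNat (c.toNat + 32)
    rw [show ((c.toNat : Int) + 32).toNat = c.toNat + 32 from by omega]
  · have h' : ¬ (65 ≤ (c.toNat : Int) ∧ (c.toNat : Int) ≤ 90) := by
      intro hc; exact h ⟨by exact_mod_cast hc.1, by exact_mod_cast hc.2⟩
    rw [if_neg h', if_neg h]

lemma pvFoldl_map (f : Char → Char) (l : List Char) (acc : List Char) :
    l.foldl (fun acc c => acc ++ [f c]) acc = acc ++ l.map f := by
  induction l generalizing acc with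
  | nil => simp
  | cons c t ih => simp [List.foldl_cons, ih]

-- ===== VERDICT (by name: the statement is the Claim_ definition above) =====
theorem lower_custom_spec : Claim_equal_lower_custom := by
  intro s _
  unfold Spec_lower_custom lower_custom lower_custom_alt
  congr 1
  have := pvFoldl_map
    (fun c => if 65 ≤ c.toNat ∧ c.toNat ≤ 90 then Char.ofNat (c.toNat + 32) else c)
    s.toList []
  simp only [List.nil_append] at this
  rw [show (fun (acc : List Char) (c : Char) =>
        if 65 ≤ c.toNat ∧ c.toNat ≤ 90 then acc ++ [Char.ofNat (c.toNat + 32)] else acc ++ [c]) =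
      (fun acc c => acc ++ [if 65 ≤ c.toNat ∧ c.toNat ≤ 90 then Char.ofNat (c.toNat + 32) else c])
      from by funext acc c; split <;> rfl]
  rw [this]
  exact List.map_congr_left fun c _ => (pvChar_step c).symm
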